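-- pv_equiv track=rewrite | github.com/tomashevia27/tp2-tda-hevia-campoliete-colina | pd.py | reconstruir_solucion
-- ===== SOURCE A (Python) =====
-- ATACAR = 'Atacar'
--
-- def reconstruir_solucion(n, x_i, f, OPT, solucion):
--     if n == 0:
--         return solucion
--
--     solucion[n-1] = ATACAR
--
--     maximo = 0
--     pos_ultimo_ataque = n-1
--
--     for j in range(1, n + 1):
--         if OPT[n-j] + min(x_i[n], f[j]) > maximo:
--             maximo = OPT[n-j] + min(x_i[n], f[j])
--             pos_ultimo_ataque = n-j
--
--     return reconstruir_solucion(pos_ultimo_ataque, x_i, f, OPT, solucion)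
-- ===== SOURCE B (Python) =====
-- ATACAR = 'Atacar'
--
-- def reconstruir_solucion(n, x_i, f, OPT, solucion):
--     # Phase 1: follow the DP back-pointers, only collecting the attacked positions.
--     ataques = []
--     while n != 0:
--         ataques.append(n - 1)
--         vals = [OPT[n - j] + min(x_i[n], f[j]) for j in range(1, n + 1)]
--         m = max(vals)
--         n = n - 1 - vals.index(m) if m > 0 else n - 1
--     # Phase 2: rebuild the answer in one pass, marking the collected positions.
--     solucion[:] = [ATACAR if i in ataques else s for i, s in enumerate(solucion)]
--     return solucion
-- ===== Notes on version B (the rewrite author's own statement) =====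
-- stated objective: alternative
-- what changed: Instead of A's tail recursion that mutates the answer as it goes with a running strict-> argmax scan, B runs two separate phases: an iterative back-pointer walk (max()/list.index() on a candidate list) that only collects the attacked positions, then a single enumerate pass that rebuilds the whole answer from that position list.
import Mathlib
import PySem

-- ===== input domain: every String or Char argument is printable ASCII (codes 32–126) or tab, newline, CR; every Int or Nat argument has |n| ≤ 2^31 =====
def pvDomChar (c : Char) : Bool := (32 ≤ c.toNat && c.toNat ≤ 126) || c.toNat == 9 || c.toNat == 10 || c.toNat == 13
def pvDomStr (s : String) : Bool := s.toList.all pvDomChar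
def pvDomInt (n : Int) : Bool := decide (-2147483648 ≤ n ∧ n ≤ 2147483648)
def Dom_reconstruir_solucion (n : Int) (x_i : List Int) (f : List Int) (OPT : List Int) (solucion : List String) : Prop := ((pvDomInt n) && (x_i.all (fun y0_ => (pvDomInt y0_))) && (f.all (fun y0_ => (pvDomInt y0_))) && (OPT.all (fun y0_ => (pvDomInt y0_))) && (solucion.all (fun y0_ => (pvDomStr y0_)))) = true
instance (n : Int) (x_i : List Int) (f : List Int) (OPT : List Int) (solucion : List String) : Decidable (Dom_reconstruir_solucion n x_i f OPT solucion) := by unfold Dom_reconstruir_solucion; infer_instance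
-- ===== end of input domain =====

-- B replaces A's self-mutating tail recursion by two phases: an iterative back-pointer walk that only
-- collects the attacked positions, then one enumerate pass rebuilding the answer (same cost, different
-- decomposition). Both Pythons mutate `solucion` (A cell by cell, B by one slice assignment with the same
-- final content); the equivalence proved here is about the return value.

-- ===== PORT A =====
-- A's tail recursion, with fuel n.toNat+1 (always sufficient: the recursion argument strictly decreases and stays ≥ 0 on inputs where A returns)
def pvAGo (fuel : Nat) (n : Int) (x_i : List Int) (f : List Int) (OPT : List Int) (solucion : List String) : List String :=
  match fuel with
  | 0 => solucion
  | fuel + 1 =>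
    if n = 0 then solucion
    else
      let solucion := PySem.List.pySetD solucion (n - 1) "Atacar"
      let st := (PySem.List.pyRange 1 (n + 1) 1).foldl
        (fun (st : Int × Int) j =>
          if PySem.List.pyGetD OPT (n - j) 0 + min (PySem.List.pyGetD x_i n 0) (PySem.List.pyGetD f j 0) > st.1
          then (PySem.List.pyGetD OPT (n - j) 0 + min (PySem.List.pyGetD x_i n 0) (PySem.List.pyGetD f j 0), n - j)
          else st) (0, n - 1)
      pvAGo fuel st.2 x_i f OPT solucion

def reconstruir_solucion (n : Int) (x_i : List Int) (f : List Int) (OPT : List Int) (solucion : List String) : List String :=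
  pvAGo (n.toNat + 1) n x_i f OPT solucion

-- ===== PORT B =====
-- Phase 1 of B: the while loop collecting the attacked positions (appended in order), same fuel convention
def pvChain (fuel : Nat) (n : Int) (x_i : List Int) (f : List Int) (OPT : List Int) : List Int :=
  match fuel with
  | 0 => []
  | fuel + 1 =>
    if n = 0 then []
    else
      let vals := (PySem.List.pyRange 1 (n + 1) 1).map
        (fun j => PySem.List.pyGetD OPT (n - j) 0 + min (PySem.List.pyGetD x_i n 0) (PySem.List.pyGetD f j 0))
      let m := (PySem.List.max? vals (fun v => v)).getD 0
      let n' := if m > 0 then n - 1 - ((PySem.List.index? vals m).getD 0 : Int) else n - 1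
      (n - 1) :: pvChain fuel n' x_i f OPT

-- Phase 2 of B: the enumerate comprehension marking the collected positions
def reconstruir_solucion_alt (n : Int) (x_i : List Int) (f : List Int) (OPT : List Int) (solucion : List String) : List String :=
  let ataques := pvChain (n.toNat + 1) n x_i f OPT
  (PySem.List.enumerate solucion 0).map (fun is => if ataques.contains is.1 then "Atacar" else is.2)

-- ===== PRECONDITION & SPEC =====
-- Pre_ = exactly the inputs on which Python A returns: n ≥ 0 (negative n descends forever until an IndexError),
-- and for n > 0 every index A touches at the top level is in range (deeper levels use strictly smaller n, so need less).
def Pre_reconstruir_solucion (n : Int) (x_i : List Int) (f : List Int) (OPT : List Int) (solucion : List String) : Prop :=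
  0 ≤ n ∧ (n = 0 ∨ (n < (x_i.length : Int) ∧ n < (f.length : Int) ∧ n ≤ (OPT.length : Int) ∧ n ≤ (solucion.length : Int)))
instance (n : Int) (x_i : List Int) (f : List Int) (OPT : List Int) (solucion : List String) : Decidable (Pre_reconstruir_solucion n x_i f OPT solucion) := by unfold Pre_reconstruir_solucion; infer_instance

def pvWitness_reconstruir_solucion : Int × List Int × List Int × List Int × List String :=
  (2, [5, 3, 7], [1, 2, 4], [0, 1, 2], ["x", "x"])

def Spec_reconstruir_solucion (n : Int) (x_i : List Int) (f : List Int) (OPT : List Int) (solucion : List String) (out : List String) : Prop := out = reconstruir_solucion_alt n x_i f OPT solucion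
instance (n : Int) (x_i : List Int) (f : List Int) (OPT : List Int) (solucion : List String) (out : List String) : Decidable (Spec_reconstruir_solucion n x_i f OPT solucion out) := by unfold Spec_reconstruir_solucion; infer_instance

-- ===== CLAIM (what is proved, stated in full; the proofs are below) =====
def Claim_equal_reconstruir_solucion : Prop := ∀ (n : Int) (x_i : List Int) (f : List Int) (OPT : List Int) (solucion : List String), Dom_reconstruir_solucion n x_i f OPT solucion → Pre_reconstruir_solucion n x_i f OPT solucion → Spec_reconstruir_solucion n x_i f OPT solucion (reconstruir_solucion n x_i f OPT solucion)

-- ===== LEMMAS AND PROOFS =====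

theorem pvFoldlMax_init (l : List Int) : ∀ x y : Int, l.foldl max (max x y) = max x (l.foldl max y) := by
  induction l with
  | nil => intro x y; rfl
  | cons z l ih =>
    intro x y
    simp only [List.foldl_cons, max_assoc, ih]

theorem pvFoldlMax_mem (l : List Int) : ∀ x : Int, l.foldl max x = x ∨ l.foldl max x ∈ l := by
  induction l with
  | nil => intro x; exact Or.inl rfl
  | cons h l ih =>
    intro x
    rw [List.foldl_cons]
    rcases ih (max x h) with h1 | h1
    · rcases max_choice x h with h2 | h2
      · rw [h1, h2]; exact Or.inl rfl
      · rw [h1, h2]; exact Or.inr (List.mem_cons_self)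
    · exact Or.inr (List.mem_cons_of_mem _ h1)

-- Core lemma: A's running strict-> argmax over range(a,b) equals B's max/first-index computation.
theorem pvScan_eq (b : Int) (g : Int → Int) (n : Int) : ∀ (a m0 p0 : Int),
    (PySem.List.pyRange a b 1).foldl
      (fun (st : Int × Int) j => if g j > st.1 then (g j, n - j) else st) (m0, p0)
    = (let vals := (PySem.List.pyRange a b 1).map g
       let m := (PySem.List.max? vals (fun v => v)).getD m0
       if m > m0 then (m, n - a - ((PySem.List.index? vals m).getD 0 : Int)) else (m0, p0)) := by
  intro a
  induction hk : (b - a).toNat generalizing a with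
  | zero =>
    intro m0 p0
    have hba : b ≤ a := by omega
    rw [PySem.List.pyRange_one_eq_nil hba]
    have h0 : PySem.List.max? ([] : List Int) (fun v => v) = none :=
      (PySem.List.max?_eq_none_iff _ _).mpr rfl
    simp [h0]
  | succ k ih =>
    intro m0 p0
    have hab : a < b := by omega
    rw [PySem.List.pyRange_one_cons hab, List.foldl_cons, List.map_cons]
    have ihs := ih (a + 1) (by omega)
    by_cases hga : g a > m0
    · rw [if_pos hga, ihs (g a) (n - a)]
      cases ht : (PySem.List.pyRange (a + 1) b 1).map g with
      | nil =>
        have h0 : PySem.List.max? ([] : List Int) (fun v => v) = none :=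
          (PySem.List.max?_eq_none_iff _ _).mpr rfl
        simp [PySem.List.max?_id_cons, h0, hga]
      | cons h t2 =>
        simp only [PySem.List.max?_id_cons, Option.getD_some, List.foldl_cons]
        have hM : List.foldl max (max (g a) h) t2 = max (g a) (List.foldl max h t2) :=
          pvFoldlMax_init t2 (g a) h
        by_cases hm : List.foldl max h t2 > g a
        · rw [if_pos hm]
          have hmem : List.foldl max h t2 ∈ h :: t2 := by
            rcases pvFoldlMax_mem t2 h with h1 | h1
            · rw [h1]; exact List.mem_cons_self
            · exact List.mem_cons_of_mem _ h1
          obtain ⟨i, hi⟩ := Option.isSome_iff_exists.mp ((PySem.List.index?_isSome_iff _ _).mpr hmem)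
          have hne : g a ≠ List.foldl max h t2 := ne_of_lt hm
          rw [hM, max_eq_right (le_of_lt hm), if_pos (lt_trans hga hm),
            PySem.List.index?_cons_of_ne _ hne, hi]
          simp only [Option.map_some, Option.getD_some]
          have : (n : Int) - a - ((i : Int) + 1) = n - (a + 1) - i := by ring
          rw [Prod.mk.injEq]
          constructor
          · rfl
          · push_cast
            omega
        · rw [if_neg hm, hM, max_eq_left (le_of_not_gt hm), if_pos hga,
            PySem.List.index?_cons_self]
          simp
    · rw [if_neg hga, ihs m0 p0]
      cases ht : (PySem.List.pyRange (a + 1) b 1).map g with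
      | nil =>
        have h0 : PySem.List.max? ([] : List Int) (fun v => v) = none :=
          (PySem.List.max?_eq_none_iff _ _).mpr rfl
        dsimp only
        rw [h0, PySem.List.max?_id_cons]
        simp only [List.foldl_nil, Option.getD_none, Option.getD_some]
        rw [if_neg (lt_irrefl m0), if_neg hga]
      | cons h t2 =>
        simp only [PySem.List.max?_id_cons, Option.getD_some, List.foldl_cons]
        have hM : List.foldl max (max (g a) h) t2 = max (g a) (List.foldl max h t2) :=
          pvFoldlMax_init t2 (g a) h
        by_cases hm : List.foldl max h t2 > m0
        · rw [if_pos hm]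
          have hgam : g a < List.foldl max h t2 := lt_of_le_of_lt (le_of_not_gt hga) hm
          have hmem : List.foldl max h t2 ∈ h :: t2 := by
            rcases pvFoldlMax_mem t2 h with h1 | h1
            · rw [h1]; exact List.mem_cons_self
            · exact List.mem_cons_of_mem _ h1
          obtain ⟨i, hi⟩ := Option.isSome_iff_exists.mp ((PySem.List.index?_isSome_iff _ _).mpr hmem)
          rw [hM, max_eq_right (le_of_lt hgam), if_pos hm,
            PySem.List.index?_cons_of_ne _ (ne_of_lt hgam), hi]
          simp only [Option.map_some, Option.getD_some]
          rw [Prod.mk.injEq]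
          constructor
          · rfl
          · push_cast
            omega
        · rw [if_neg hm, hM]
          have hle : max (g a) (List.foldl max h t2) ≤ m0 :=
            max_le (le_of_not_gt hga) (le_of_not_gt hm)
          rw [if_neg (not_lt.mpr hle)]

-- A's recursion is the fold of in-place marks along B's chain of positions.
theorem pvAGo_markFold (fuel : Nat) : ∀ (n : Int) (x_i f OPT : List Int) (sol : List String),
    pvAGo fuel n x_i f OPT sol
      = (pvChain fuel n x_i f OPT).foldl (fun s p => PySem.List.pySetD s p "Atacar") sol := by
  induction fuel with
  | zero => intro n x_i f OPT sol; rfl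
  | succ fuel ih =>
    intro n x_i f OPT sol
    simp only [pvAGo, pvChain]
    by_cases hn : n = 0
    · simp [hn]
    · rw [if_neg hn, if_neg hn, List.foldl_cons,
        pvScan_eq (n + 1)
          (fun j => PySem.List.pyGetD OPT (n - j) 0 +
            min (PySem.List.pyGetD x_i n 0) (PySem.List.pyGetD f j 0)) n 1 0 (n - 1)]
      dsimp only
      rw [apply_ite Prod.snd]
      split
      · exact ih _ _ _ _ _
      · exact ih _ _ _ _ _

-- Every position in the chain lies in [0, n).
theorem pvChain_bounds (fuel : Nat) : ∀ (n : Int) (x_i f OPT : List Int), 0 ≤ n →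
    ∀ p ∈ pvChain fuel n x_i f OPT, 0 ≤ p ∧ p < n := by
  induction fuel with
  | zero => intro n x_i f OPT _ p hp; simp [pvChain] at hp
  | succ fuel ih =>
    intro n x_i f OPT hn p hp
    by_cases h0 : n = 0
    · simp [pvChain, h0] at hp
    · have hn1 : 1 ≤ n := by omega
      rw [pvChain, if_neg h0] at hp
      set vals := (PySem.List.pyRange 1 (n + 1) 1).map
        (fun j => PySem.List.pyGetD OPT (n - j) 0 +
          min (PySem.List.pyGetD x_i n 0) (PySem.List.pyGetD f j 0)) with hvals
      set m := (PySem.List.max? vals (fun v => v)).getD 0 with hm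
      set n' := if m > 0 then n - 1 - ((PySem.List.index? vals m).getD 0 : Int) else n - 1 with hn'
      have hb : 0 ≤ n' ∧ n' < n := by
        by_cases hmp : m > 0
        · have hne : vals ≠ [] := by
            intro hnil
            rw [hm, (PySem.List.max?_eq_none_iff vals (fun v => v)).mpr hnil] at hmp
            simp at hmp
          obtain ⟨v, t, hvt⟩ := List.exists_cons_of_ne_nil hne
          have hmem : m ∈ vals := by
            rw [hm, hvt, PySem.List.max?_id_cons, Option.getD_some]
            rcases pvFoldlMax_mem t v with h1 | h1
            · rw [h1]; exact List.mem_cons_self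
            · exact List.mem_cons_of_mem _ h1
          obtain ⟨i, hi⟩ := Option.isSome_iff_exists.mp ((PySem.List.index?_isSome_iff _ _).mpr hmem)
          obtain ⟨hk, -, -⟩ := PySem.List.getElem_of_index?_eq_some hi
          have hlv : vals.length = (n : Int).toNat := by
            rw [hvals, List.length_map, PySem.List.length_pyRange_one]
            omega
          rw [hn', if_pos hmp, hi]
          simp only [Option.getD_some]
          rw [hlv] at hk
          omega
        · rw [hn', if_neg hmp]; omega
      rcases List.mem_cons.mp hp with rfl | htail
      · omega
      · have := ih n' x_i f OPT hb.1 p htail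
        omega

-- Marking p in place and then mark-mapping ps equals mark-mapping (p :: ps), for in-range p.
theorem pvMark_set (sol : List String) (p : Int) (ps : List Int)
    (hp0 : 0 ≤ p) (_hpl : p < (sol.length : Int)) :
    (PySem.List.enumerate (PySem.List.pySetD sol p "Atacar") 0).map
      (fun is => if ps.contains is.1 then "Atacar" else is.2)
    = (PySem.List.enumerate sol 0).map
      (fun is => if (p :: ps).contains is.1 then "Atacar" else is.2) := by
  rw [PySem.List.pySetD_of_nonneg sol "Atacar" hp0]
  apply List.ext_getElem
  · simp [PySem.List.length_enumerate]
  · intro k h1 h2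
    simp only [List.length_map, PySem.List.length_enumerate, List.length_set] at h1 h2
    rw [List.getElem_map, List.getElem_map, PySem.List.getElem_enumerate, PySem.List.getElem_enumerate]
    simp only [List.contains_cons, zero_add]
    by_cases hk : (k : Int) = p
    · have hkn : p.toNat = k := by omega
      rw [List.getElem_set, if_pos hkn]
      simp [hk]
    · have hkn : p.toNat ≠ k := by omega
      rw [List.getElem_set, if_neg hkn]
      simp [hk]

-- The fold of in-place marks equals B's single enumerate pass, for in-range positions.
theorem pvMarkFold_enum : ∀ (ps : List Int) (sol : List String),
    (∀ p ∈ ps, 0 ≤ p ∧ p < (sol.length : Int)) →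
    ps.foldl (fun s p => PySem.List.pySetD s p "Atacar") sol
      = (PySem.List.enumerate sol 0).map (fun is => if ps.contains is.1 then "Atacar" else is.2) := by
  intro ps
  induction ps with
  | nil =>
    intro sol _
    simp only [List.foldl_nil, List.contains_nil, Bool.false_eq_true, if_false]
    exact (PySem.List.map_snd_enumerate sol 0).symm
  | cons p ps ih =>
    intro sol hb
    obtain ⟨hp0, hpl⟩ := hb p List.mem_cons_self
    rw [List.foldl_cons, ih _ (by
      intro q hq
      have hlen : (PySem.List.pySetD sol p "Atacar").length = sol.length :=
        PySem.List.length_pySetD _ _ _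
      have := hb q (List.mem_cons_of_mem _ hq)
      omega)]
    exact pvMark_set sol p ps hp0 hpl

-- ===== VERDICT (by name: the statement is the Claim_ definition above) =====
theorem reconstruir_solucion_spec : Claim_equal_reconstruir_solucion := by
  intro n x_i f OPT solucion _ hpre
  obtain ⟨hn0, hpre⟩ := hpre
  unfold Spec_reconstruir_solucion reconstruir_solucion reconstruir_solucion_alt
  rw [pvAGo_markFold]
  apply pvMarkFold_enum
  intro p hp
  have hb := pvChain_bounds (n.toNat + 1) n x_i f OPT hn0 p hp
  rcases hpre with rfl | ⟨-, -, -, hsl⟩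
  · omega
  · omega
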